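-- pv_equiv track=rewrite | github.com/daniel-reich/ubiquitous-fiesta | FmowTJecDKQMRqsHS_23.py | crop_hydrated
-- ===== SOURCE A (Python) =====
-- def crop_hydrated(field):
--   for i in range(len(field)):
--     for j in range(len(field[i])):
--       if field[i][j] != 'w':
--         c = 0
--         adj = ((1,1),(1,0),(1,-1),(0,1),(0,-1),(-1,1),(-1,0),(-1,-1))
--         for x, y in adj:
--           try:
--             if i+x > -1 and j+y > -1:
--               if field[i+x][j+y] == 'w':
--                 c += 1
--                 break
--           except:
--             pass
--         if not c:
--           return False
--   return True
-- ===== SOURCE B (Python) =====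
-- def crop_hydrated(field):
--     hydrated = {(i + dx, j + dy)
--                 for i, row in enumerate(field)
--                 for j, cell in enumerate(row) if cell == 'w'
--                 for dx in (-1, 0, 1) for dy in (-1, 0, 1)}
--     return all((i, j) in hydrated
--                for i, row in enumerate(field)
--                for j, cell in enumerate(row) if cell != 'w')
-- ===== Notes on version B (the rewrite author's own statement) =====
-- stated objective: alternative
-- what changed: Instead of scanning the 8 neighbors of every non-water cell with try/except index probing, B scatters hydration from each water cell into a set of coordinates in one pass and then verifies every crop cell against that set.
import Mathlib
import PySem

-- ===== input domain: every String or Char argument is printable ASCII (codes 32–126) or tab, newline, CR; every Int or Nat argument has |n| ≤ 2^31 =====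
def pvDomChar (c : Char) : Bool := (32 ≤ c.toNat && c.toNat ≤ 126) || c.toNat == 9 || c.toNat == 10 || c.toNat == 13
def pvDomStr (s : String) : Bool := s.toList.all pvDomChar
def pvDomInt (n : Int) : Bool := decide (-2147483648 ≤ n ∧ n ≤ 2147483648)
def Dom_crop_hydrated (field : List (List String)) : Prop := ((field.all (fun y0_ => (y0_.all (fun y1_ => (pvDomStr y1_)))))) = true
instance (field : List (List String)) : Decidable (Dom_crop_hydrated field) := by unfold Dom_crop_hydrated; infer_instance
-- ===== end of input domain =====

-- B replaces the per-crop try/except neighbor scan by a set of coordinates hydrated by water cells,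
-- built in one pass and then checked against every crop cell (alternative decomposition, same cost).


-- ===== PORT A =====
-- the literal 8-tuple `adj` from A
def pvAdj : List (Int × Int) :=
  [(1,1),(1,0),(1,-1),(0,1),(0,-1),(-1,1),(-1,0),(-1,-1)]

-- A's inner `for x, y in adj` loop with break: any offset passing the guard hits 'w'
-- (the try/except around the lookup = the pyGet? lookups returning none count as no hit)
def pvNeighborWater (field : List (List String)) (i j : Int) : Bool :=
  pvAdj.any fun xy =>
    i + xy.1 > -1 && j + xy.2 > -1 &&
      (((PySem.List.pyGet? field (i + xy.1)).bind
          (fun row => PySem.List.pyGet? row (j + xy.2))) == some "w")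

def crop_hydrated (field : List (List String)) : Bool :=
  (PySem.List.pyRange 0 field.length 1).all fun i =>
    (PySem.List.pyRange 0 (PySem.List.pyGetD field i []).length 1).all fun j =>
      if PySem.List.pyGetD (PySem.List.pyGetD field i []) j "" ≠ "w" then
        pvNeighborWater field i j
      else true

-- ===== PORT B =====
def pvOffsets : List Int := [-1, 0, 1]

-- B's set comprehension: all coordinates within Chebyshev distance 1 of some water cell
def pvHydratedList (field : List (List String)) : List (Int × Int) :=
  (PySem.List.enumerate field).flatMap fun ir =>
    (PySem.List.enumerate ir.2).flatMap fun jc =>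
      if jc.2 == "w" then
        pvOffsets.flatMap fun dx => pvOffsets.map fun dy => (ir.1 + dx, jc.1 + dy)
      else []

def crop_hydrated_alt (field : List (List String)) : Bool :=
  let hydrated : PySem.Set (Int × Int) := PySem.Set.ofList (pvHydratedList field)
  (PySem.List.enumerate field).all fun ir =>
    (PySem.List.enumerate ir.2).all fun jc =>
      jc.2 == "w" || PySem.Set.contains hydrated (ir.1, jc.1)

-- ===== PRECONDITION & SPEC =====
def Spec_crop_hydrated (field : List (List String)) (out : Bool) : Prop := out = crop_hydrated_alt field
instance (field : List (List String)) (out : Bool) : Decidable (Spec_crop_hydrated field out) := by unfold Spec_crop_hydrated; infer_instance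

-- ===== CLAIM (what is proved, stated in full; the proofs are below) =====
def Claim_equal_crop_hydrated : Prop := ∀ (field : List (List String)), Dom_crop_hydrated field → Spec_crop_hydrated field (crop_hydrated field)

-- ===== LEMMAS AND PROOFS =====

-- the common specification: every in-range non-water cell has an in-range water cell
-- at Chebyshev distance ≤ 1
def pvGood (field : List (List String)) : Prop :=
  ∀ (a : Nat) (ha : a < field.length) (b : Nat) (hb : b < field[a].length),
    field[a][b] ≠ "w" → ((a : Int), (b : Int)) ∈ pvHydratedList field

lemma mem_pvHydratedList {field : List (List String)} {p q : Int} :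
    (p, q) ∈ pvHydratedList field ↔
      ∃ (a : Nat) (ha : a < field.length) (b : Nat) (hb : b < field[a].length),
        field[a][b] = "w" ∧ ∃ dx ∈ pvOffsets, ∃ dy ∈ pvOffsets,
          p = (a : Int) + dx ∧ q = (b : Int) + dy := by
  simp only [pvHydratedList, List.mem_flatMap, PySem.List.mem_enumerate_iff,
    List.mem_ite_nil_right, beq_iff_eq, List.mem_map, zero_add, Prod.mk.injEq]
  constructor
  · rintro ⟨x, ⟨a, ha, rfl⟩, y, ⟨b, hb, rfl⟩, hw, dx, hdx, dy, hdy, hp, hq⟩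
    exact ⟨a, ha, b, hb, hw, dx, hdx, dy, hdy, hp.symm, hq.symm⟩
  · rintro ⟨a, ha, b, hb, hw, dx, hdx, dy, hdy, hp, hq⟩
    exact ⟨(↑a, field[a]), ⟨a, ha, rfl⟩, (↑b, field[a][b]), ⟨b, hb, rfl⟩, hw, dx, hdx, dy, hdy, hp.symm, hq.symm⟩

lemma pvAdj_neg : ∀ xy ∈ pvAdj, -xy.1 ∈ pvOffsets ∧ -xy.2 ∈ pvOffsets := by decide

lemma pvOffsets_adj : ∀ dx ∈ pvOffsets, ∀ dy ∈ pvOffsets, ¬(dx = 0 ∧ dy = 0) →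
    (-dx, -dy) ∈ pvAdj := by decide

lemma pvNeighborWater_iff {field : List (List String)} {a b : Nat}
    (ha : a < field.length) (hb : b < field[a].length) (hw : field[a][b] ≠ "w") :
    pvNeighborWater field a b = true ↔ ((a : Int), (b : Int)) ∈ pvHydratedList field := by
  rw [pvNeighborWater, List.any_eq_true, mem_pvHydratedList]
  constructor
  · rintro ⟨⟨x, y⟩, hxy, h⟩
    simp only [Bool.and_eq_true, decide_eq_true_eq, beq_iff_eq, Option.bind_eq_some_iff] at h
    obtain ⟨⟨hgx, hgy⟩, row, hrow, hcell⟩ := h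
    rw [PySem.List.pyGet?_of_nonneg field (by omega : (0:Int) ≤ ↑a + x)] at hrow
    rw [PySem.List.pyGet?_of_nonneg row (by omega : (0:Int) ≤ ↑b + y)] at hcell
    rw [List.getElem?_eq_some_iff] at hrow
    obtain ⟨ha', hrow⟩ := hrow
    subst hrow
    rw [List.getElem?_eq_some_iff] at hcell
    obtain ⟨hb', hcell⟩ := hcell
    obtain ⟨hox, hoy⟩ := pvAdj_neg _ hxy
    exact ⟨_, ha', _, hb', hcell, -x, hox, -y, hoy, by omega, by omega⟩
  · rintro ⟨a', ha', b', hb', hw', dx, hdx, dy, hdy, hp, hq⟩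
    have hne : ¬(dx = 0 ∧ dy = 0) := by
      rintro ⟨rfl, rfl⟩
      have : a = a' := by omega
      subst this
      have : b = b' := by omega
      subst this
      exact hw hw'
    refine ⟨(-dx, -dy), pvOffsets_adj dx hdx dy hdy hne, ?_⟩
    have hx : (a : Int) + -dx = (a' : Int) := by omega
    have hy : (b : Int) + -dy = (b' : Int) := by omega
    simp only [Bool.and_eq_true, decide_eq_true_eq, beq_iff_eq]
    refine ⟨⟨by omega, by omega⟩, ?_⟩
    rw [hx, PySem.List.pyGet?_natCast, List.getElem?_eq_getElem ha', Option.bind_some,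
      hy, PySem.List.pyGet?_natCast, List.getElem?_eq_getElem hb', hw']

lemma crop_hydrated_iff (field : List (List String)) :
    crop_hydrated field = true ↔ pvGood field := by
  rw [crop_hydrated]
  simp only [List.all_eq_true, PySem.List.mem_pyRange_one]
  constructor
  · intro h a ha b hb hw
    have h1 := h (a : Int) ⟨by omega, by omega⟩ (b : Int)
    rw [PySem.List.pyGetD_natCast, List.getD_eq_getElem?_getD , List.getElem?_eq_getElem ha,
      Option.getD_some] at h1
    have h2 := h1 ⟨by omega, by omega⟩
    rw [PySem.List.pyGetD_natCast, List.getD_eq_getElem?_getD, List.getElem?_eq_getElem hb,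
      Option.getD_some, if_pos hw] at h2
    exact (pvNeighborWater_iff ha hb hw).1 h2
  · intro h i hi j
    have ha : i.toNat < field.length := by omega
    rw [PySem.List.pyGetD_of_nonneg field [] (by omega), List.getD_eq_getElem?_getD,
      List.getElem?_eq_getElem ha, Option.getD_some]
    intro hj
    have hb : j.toNat < field[i.toNat].length := by omega
    rw [PySem.List.pyGetD_of_nonneg _ "" (by omega), List.getD_eq_getElem?_getD,
      List.getElem?_eq_getElem hb, Option.getD_some]
    split_ifs with hw
    · have hi' : ((i.toNat : Nat) : Int) = i := by omega
      have hj' : ((j.toNat : Nat) : Int) = j := by omega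
      rw [← hi', ← hj']
      exact (pvNeighborWater_iff ha hb hw).2 (h i.toNat ha j.toNat hb hw)
    · rfl

lemma crop_hydrated_alt_iff (field : List (List String)) :
    crop_hydrated_alt field = true ↔ pvGood field := by
  rw [crop_hydrated_alt]
  simp only [List.all_eq_true, PySem.List.mem_enumerate_iff, Bool.or_eq_true, beq_iff_eq,
    PySem.Set.contains_iff, PySem.Set.mem_ofList, zero_add]
  constructor
  · intro h a ha b hb hw
    have := h (↑a, field[a]) ⟨a, ha, rfl⟩ (↑b, field[a][b]) ⟨b, hb, rfl⟩
    exact this.resolve_left hw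
  · rintro h x ⟨a, ha, rfl⟩ y ⟨b, hb, rfl⟩
    by_cases hw : field[a][b] = "w"
    · exact Or.inl hw
    · exact Or.inr (h a ha b hb hw)

-- ===== VERDICT (by name: the statement is the Claim_ definition above) =====
theorem crop_hydrated_spec : Claim_equal_crop_hydrated := by
  intro field _
  unfold Spec_crop_hydrated
  have h := (crop_hydrated_iff field).trans (crop_hydrated_alt_iff field).symm
  cases hA : crop_hydrated field <;> cases hB : crop_hydrated_alt field <;>
    simp_all
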